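-- pv_equiv track=rewrite | github.com/benquick123/code-profiling | code/batch-2/dn6 - spet tviti/Z-17164-2443.py | hashtagi
-- ===== SOURCE A (Python) =====
-- def avtor(tvit):
--     s = tvit.split(':')
--     return s[0]
--
-- def nazaj(beseda):
--     return beseda[::-1]
--
-- def izloci_besedo(beseda):
--     while True:
--         for znak in beseda:
--             while znak.isalnum() == False:
--                 beseda = beseda[1:]
--                 break
--             if znak.isalnum() == True:
--                 beseda = beseda[:]
--                 break
--         for znak in nazaj(beseda):
--             while znak.isalnum() == False:
--                 beseda = beseda[:-1]
--                 break
--             if znak.isalnum() == True: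
--                 beseda = beseda[:]
--                 break
--         return beseda
--
-- def se_zacne_z(tvit, c):
--     s = []
--     for beseda in tvit.split():
--         if beseda[0] == c:
--             f = izloci_besedo(beseda)
--             s.append(f)
--     return s
--
-- def hashtagi(tviti):
--     slovar = {}
--     for tvit in tviti:
--         lojtre = se_zacne_z(tvit, '#')
--         for lojtra in lojtre:
--             #avtorji = avtor(tvit)
--             if lojtra in slovar:
--                 slovar[lojtra] += [avtor(tvit)]
--             else:
--                 slovar[lojtra] = [avtor(tvit)]
--     for lojtra, pisci in slovar.items():
--         povrsti = sorted(pisci)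
--         slovar[lojtra] = povrsti
--     return slovar
-- ===== SOURCE B (Python) =====
-- def avtor(tvit):
--     s = tvit.split(':')
--     return s[0]
--
-- def _lstrip_nonalnum(s):
--     for i, ch in enumerate(s):
--         if ch.isalnum():
--             return s[i:]
--     return ''
--
-- def _clean(w):
--     w = _lstrip_nonalnum(w)
--     return _lstrip_nonalnum(w[::-1])[::-1]
--
-- def hashtagi(tviti):
--     pairs = [(_clean(w), avtor(t)) for t in tviti for w in t.split() if w.startswith('#')]
--     tags = list(dict.fromkeys(h for h, _ in pairs))
--     return {h: sorted(a for g, a in pairs if g == h) for h in tags}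
-- ===== Notes on version B (the rewrite author's own statement) =====
-- stated objective: alternative
-- what changed: B replaces A's character-by-character slicing loops and incremental membership-tested dict building plus in-place re-sorting pass by: flatten all tweets once into a (hashtag, author) pair list using a closed-form strip helper, dedup the hashtags, and build each sorted author group by filtering the pair list.
import Mathlib
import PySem

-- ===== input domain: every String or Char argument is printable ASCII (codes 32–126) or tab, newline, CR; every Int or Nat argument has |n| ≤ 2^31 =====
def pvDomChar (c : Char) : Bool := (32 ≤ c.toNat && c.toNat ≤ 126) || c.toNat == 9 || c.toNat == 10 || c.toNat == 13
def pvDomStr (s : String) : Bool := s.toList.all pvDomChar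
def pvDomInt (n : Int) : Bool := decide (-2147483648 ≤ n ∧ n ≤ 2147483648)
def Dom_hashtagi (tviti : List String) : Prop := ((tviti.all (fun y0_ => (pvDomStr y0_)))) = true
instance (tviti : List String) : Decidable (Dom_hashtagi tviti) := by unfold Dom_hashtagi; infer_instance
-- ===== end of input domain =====

-- B groups hashtags by flattening all tweets once into a (hashtag, author) pair list (closed-form
-- strip helper), deduping the hashtags and filtering the pair list per hashtag, instead of A's
-- character-looping strip and incrementally built dict with a final in-place re-sorting pass
-- (objective: alternative decomposition, same results).

-- ===== PORT A =====
-- avtor: tvit.split(':')[0]; split? with a nonempty separator is always `some` of a nonempty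
-- list, so both getD defaults are unreachable.
def avtor (tvit : String) : String :=
  let s := (PySem.Str.split? tvit ":").getD []
  (PySem.List.pyGet? s 0).getD ""

-- nazaj: beseda[::-1]; slice? with step -1 is always `some`.
def nazaj (beseda : String) : String :=
  (PySem.Str.slice? beseda none none (-1)).getD ""

-- first for-loop of izloci_besedo: iterates over the ORIGINAL characters, dropping one leading
-- char of the current beseda per non-alnum char seen, breaking at the first alnum char.
def izlociFront : List Char → String → String
  | [], b => b
  | znak :: rest, b =>
    if PySem.Chars.isalnum znak = false then izlociFront rest (PySem.Str.slice b (some 1) none)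
    else PySem.Str.slice b none none

-- second for-loop: same over nazaj(beseda), dropping trailing chars (beseda[:-1]).
def izlociBack : List Char → String → String
  | [], b => b
  | znak :: rest, b =>
    if PySem.Chars.isalnum znak = false then izlociBack rest (PySem.Str.slice b none (some (-1)))
    else PySem.Str.slice b none none

def izloci_besedo (beseda : String) : String :=
  let b1 := izlociFront beseda.toList beseda
  izlociBack (nazaj b1).toList b1

-- beseda[0] is a 1-character string compared with c (words from split() are nonempty, so the
-- getD default is unreachable).
def se_zacne_z (tvit : String) (c : String) : List String :=
  (PySem.Str.split₀ tvit).foldl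
    (fun s beseda =>
      if (((PySem.Str.pyGet? beseda 0).map (fun ch => String.ofList [ch])).getD "") == c then
        s ++ [izloci_besedo beseda]
      else s) []

-- slovar[lojtra] += [x] reads the present value (contains holds, so getD's default is unreachable);
-- the final loop reassigns each existing key in place while iterating the items snapshot.
def hashtagi (tviti : List String) : List (String × List String) :=
  let slovar := tviti.foldl
    (fun sl tvit =>
      (se_zacne_z tvit "#").foldl
        (fun sl lojtra =>
          if sl.contains lojtra then sl.insert lojtra (sl.getD lojtra [] ++ [avtor tvit])
          else sl.insert lojtra [avtor tvit]) sl)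
    PySem.Dict.empty
  (slovar.items.foldl
    (fun sl p => sl.insert p.1 (PySem.List.sorted p.2 (fun x => x) false)) slovar).items

-- ===== PORT B =====
-- _lstrip_nonalnum: return s[i:] at the first alnum char (keep the remainder), else ''.
def lstripNonalnum : List Char → List Char
  | [] => []
  | ch :: rest => if PySem.Chars.isalnum ch then ch :: rest else lstripNonalnum rest

-- _clean: strip the front, then strip the front of the reversal and reverse back (w[::-1] is
-- String reversal, PySem.Str.slice?_none_none_neg_one).
def cleanB (w : String) : String :=
  let w1 := String.ofList (lstripNonalnum w.toList)
  String.ofList (lstripNonalnum w1.toList.reverse).reverse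

def hashtagi_alt (tviti : List String) : List (String × List String) :=
  let pairs := tviti.flatMap (fun t =>
    ((PySem.Str.split₀ t).filter (fun w => PySem.Str.startswith w "#")).map
      (fun w => (cleanB w, avtor t)))
  let tags := PySem.List.dedup (pairs.map (fun p => p.1))
  tags.map (fun h =>
    (h, PySem.List.sorted ((pairs.filter (fun p => p.1 == h)).map (fun p => p.2))
          (fun x => x) false))

-- ===== PRECONDITION & SPEC =====
def Spec_hashtagi (tviti : List String) (out : List (String × List String)) : Prop := out = hashtagi_alt tviti
instance (tviti : List String) (out : List (String × List String)) : Decidable (Spec_hashtagi tviti out) := by unfold Spec_hashtagi; infer_instance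

-- ===== CLAIM (what is proved, stated in full; the proofs are below) =====
def Claim_equal_hashtagi : Prop := ∀ (tviti : List String), Dom_hashtagi tviti → Spec_hashtagi tviti (hashtagi tviti)

-- ===== LEMMAS AND PROOFS =====

-- B's strip helper is dropWhile of non-alnum.
theorem lstripNonalnum_eq_dropWhile (l : List Char) :
    lstripNonalnum l = l.dropWhile (fun c => !PySem.Chars.isalnum c) := by
  induction l with
  | nil => rfl
  | cons c t ih =>
    simp only [lstripNonalnum, List.dropWhile_cons]
    by_cases h : PySem.Chars.isalnum c <;> simp [h, ih]

theorem toList_inj' (s t : String) (h : s.toList = t.toList) : s = t := by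
  rw [← String.ofList_toList (s := s), h, String.ofList_toList]

theorem izlociFront_eq (cs : List Char) : ∀ (b : String), b.toList = cs →
    izlociFront cs b = String.ofList (cs.dropWhile (fun c => !PySem.Chars.isalnum c)) := by
  induction cs with
  | nil =>
    intro b hb
    simp only [izlociFront, List.dropWhile_nil]
    rw [← hb, String.ofList_toList]
  | cons c t ih =>
    intro b hb
    by_cases h : PySem.Chars.isalnum c
    · have hred : izlociFront (c :: t) b = PySem.Str.slice b none none := by
        simp [izlociFront, h]
      rw [hred]
      apply toList_inj'
      rw [PySem.Str.toList_slice]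
      simp [PySem.Chars.slice, hb, h]
    · have hred : izlociFront (c :: t) b = izlociFront t (PySem.Str.slice b (some 1) none) := by
        simp [izlociFront, h]
      rw [hred, ih _ (by
        rw [PySem.Str.toList_slice]
        simp [PySem.Chars.slice, PySem.List.slice_from_one, hb])]
      have h' : PySem.Chars.isalnum c = false := by simp [h]
      simp [h']

theorem izlociBack_eq (cs : List Char) : ∀ (b : String), b.toList.reverse = cs →
    izlociBack cs b = String.ofList ((cs.dropWhile (fun c => !PySem.Chars.isalnum c)).reverse) := by
  induction cs with
  | nil =>
    intro b hb
    simp only [izlociBack, List.dropWhile_nil, List.reverse_nil]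
    have : b.toList = [] := by simpa using congrArg List.reverse hb
    rw [← this, String.ofList_toList]
  | cons c t ih =>
    intro b hb
    have hbt : b.toList = (c :: t).reverse := by rw [← hb]; simp
    by_cases h : PySem.Chars.isalnum c
    · have hred : izlociBack (c :: t) b = PySem.Str.slice b none none := by
        simp [izlociBack, h]
      rw [hred]
      apply toList_inj'
      rw [PySem.Str.toList_slice]
      simp [PySem.Chars.slice, hbt, h]
    · have hred : izlociBack (c :: t) b = izlociBack t (PySem.Str.slice b none (some (-1))) := by
        simp [izlociBack, h]
      rw [hred, ih _ (by
        rw [PySem.Str.toList_slice]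
        simp only [PySem.Chars.slice]
        rw [PySem.List.slice_to_neg_one, hbt]
        simp)]
      have h' : PySem.Chars.isalnum c = false := by simp [h]
      simp [h']

theorem izloci_eq_cleanB (w : String) : izloci_besedo w = cleanB w := by
  unfold izloci_besedo cleanB nazaj
  simp only [izlociFront_eq w.toList w rfl, PySem.Str.slice?_none_none_neg_one, Option.getD_some,
    String.toList_ofList, lstripNonalnum_eq_dropWhile]
  rw [izlociBack_eq _ _ (by simp)]

-- the guard beseda[0] == '#' is startswith(beseda, '#') (also for the empty word).
theorem guard_eq (w : String) :
    ((((PySem.Str.pyGet? w 0).map (fun ch => String.ofList [ch])).getD "") == "#")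
      = PySem.Str.startswith w "#" := by
  rw [← String.ofList_toList (s := w)]
  cases h : w.toList with
  | nil => decide
  | cons c t =>
    have h1 : PySem.Str.pyGet? (String.ofList (c :: t)) 0 = some c := by
      simp [PySem.Str.pyGet?, PySem.List.pyGet?, PySem.List.pyIdx?]
    have h2 : PySem.Str.startswith (String.ofList (c :: t)) "#" = (c == '#') := by
      simp only [PySem.Str.startswith, PySem.Chars.startswith, String.toList_ofList]
      show ['#'].isPrefixOf (c :: t) = (c == '#')
      simp [List.isPrefixOf, eq_comm]
    rw [h1, h2]
    simp only [Option.map_some, Option.getD_some]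
    cases hc : (c == '#') with
    | true =>
      have : c = '#' := by simpa using hc
      subst this; decide
    | false =>
      have hne : c ≠ '#' := by simpa using hc
      simp only [beq_eq_false_iff_ne, ne_eq]
      intro hcontra
      exact hne (by
        have := congrArg String.toList hcontra
        simpa using this)

theorem se_zacne_z_eq (t : String) :
    se_zacne_z t "#" = ((PySem.Str.split₀ t).filter (fun w => PySem.Str.startswith w "#")).map cleanB := by
  unfold se_zacne_z
  have hf : (fun (s : List String) (beseda : String) =>
      if (((PySem.Str.pyGet? beseda 0).map (fun ch => String.ofList [ch])).getD "") == "#" then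
        s ++ [izloci_besedo beseda] else s)
    = fun s w => if PySem.Str.startswith w "#" = true then s ++ [cleanB w] else s := by
    funext s w
    rw [guard_eq, izloci_eq_cleanB]
  rw [hf, PySem.List.foldl_append_if]
  simp

-- the dict-building step over one (hashtag, author) pair
def stepP (d : PySem.Dict String (List String)) (p : String × String) : PySem.Dict String (List String) :=
  if d.contains p.1 then d.insert p.1 (d.getD p.1 [] ++ [p.2]) else d.insert p.1 [p.2]

theorem stepP_eq_insert (d : PySem.Dict String (List String)) (p : String × String) :
    stepP d p = d.insert p.1 ((if d.contains p.1 then d.getD p.1 [] else []) ++ [p.2]) := by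
  unfold stepP; by_cases h : d.contains p.1 <;> simp [h]

theorem getD_foldl_stepP (l : List (String × String)) : ∀ (d : PySem.Dict String (List String)) (c : String),
    (l.foldl stepP d).getD c [] = d.getD c [] ++ (l.filter (fun p => p.1 == c)).map (fun p => p.2) := by
  induction l with
  | nil => intro d c; simp
  | cons p l ih =>
    intro d c
    rw [List.foldl_cons, ih, stepP_eq_insert, PySem.Dict.getD_insert]
    by_cases hpc : c = p.1
    · rw [if_pos hpc]
      have hfilter : List.filter (fun q => q.1 == c) (p :: l)
          = p :: List.filter (fun q => q.1 == c) l := by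
        simp [hpc]
      rw [hfilter]
      by_cases hcont : d.contains p.1
      · simp [hcont, hpc]
      · have h0 : d.contains p.1 = false := by simpa using hcont
        have : d.getD c [] = [] := by rw [hpc]; exact PySem.Dict.getD_of_not_contains d [] h0
        simp [hcont, this]
    · rw [if_neg hpc]
      have hfilter : List.filter (fun q => q.1 == c) (p :: l)
          = List.filter (fun q => q.1 == c) l := by
        have : (p.1 == c) = false := by
          simpa using fun h => hpc h.symm
        simp [this]
      rw [hfilter]

theorem stepP_shape : stepP = fun (d : PySem.Dict String (List String)) (p : String × String) =>
    d.insert p.1 ((if d.contains p.1 then d.getD p.1 [] else []) ++ [p.2]) := by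
  funext d p; exact stepP_eq_insert d p

theorem keys_foldl_stepP (l : List (String × String)) :
    (l.foldl stepP PySem.Dict.empty).keys = PySem.Set.ofList (l.map (fun p => p.1)) := by
  rw [stepP_shape]
  rw [PySem.Dict.keys_foldl_insert_key l (fun p => p.1)
    (fun d p => (if d.contains p.1 then d.getD p.1 [] else []) ++ [p.2]) PySem.Dict.empty]
  rw [PySem.Dict.keys_empty]
  rfl

theorem nodup_keys_foldl_stepP (l : List (String × String)) :
    (l.foldl stepP PySem.Dict.empty).keys.Nodup := by
  rw [stepP_shape]
  exact PySem.Dict.nodup_keys_foldl_insert_key l (fun p => p.1)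
    (fun d p => (if d.contains p.1 then d.getD p.1 [] else []) ++ [p.2]) PySem.Dict.empty
    (by rw [PySem.Dict.keys_empty]; exact List.nodup_nil)

-- the two nested loops of A are the flat fold of stepP over the pair list
theorem foldl_flatMap_stepP (g : String → List (String × String)) (l : List String) :
    ∀ (d : PySem.Dict String (List String)),
    (l.flatMap g).foldl stepP d = l.foldl (fun d t => (g t).foldl stepP d) d := by
  induction l with
  | nil => intro d; rfl
  | cons t l ih =>
    intro d
    rw [List.flatMap_cons, List.foldl_append, List.foldl_cons, ih]

theorem nested_eq_flat (tviti : List String) :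
    tviti.foldl
      (fun sl tvit =>
        (se_zacne_z tvit "#").foldl
          (fun sl lojtra =>
            if sl.contains lojtra then sl.insert lojtra (sl.getD lojtra [] ++ [avtor tvit])
            else sl.insert lojtra [avtor tvit]) sl)
      PySem.Dict.empty
    = (tviti.flatMap (fun t =>
        ((PySem.Str.split₀ t).filter (fun w => PySem.Str.startswith w "#")).map
          (fun w => (cleanB w, avtor t)))).foldl stepP PySem.Dict.empty := by
  rw [foldl_flatMap_stepP]
  have hfun : (fun (sl : PySem.Dict String (List String)) (tvit : String) =>
      (se_zacne_z tvit "#").foldl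
        (fun sl lojtra =>
          if sl.contains lojtra then sl.insert lojtra (sl.getD lojtra [] ++ [avtor tvit])
          else sl.insert lojtra [avtor tvit]) sl)
    = fun sl t =>
      (((PySem.Str.split₀ t).filter (fun w => PySem.Str.startswith w "#")).map
        (fun w => (cleanB w, avtor t))).foldl stepP sl := by
    funext sl t
    rw [se_zacne_z_eq, List.foldl_map, List.foldl_map]
    rfl
  rw [hfun]

-- the re-sorting pass over a nodup-keys dict maps sorted over the values
theorem getD_foldl_sort_not_mem (f : String × List String → List String)
    (l : List (String × List String)) : ∀ (d : PySem.Dict String (List String)) (c : String),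
    c ∉ l.map (fun p => p.1) →
    (l.foldl (fun sl p => sl.insert p.1 (f p)) d).getD c [] = d.getD c [] := by
  induction l with
  | nil => intro d c _; rfl
  | cons p l ih =>
    intro d c hc
    simp only [List.map_cons, List.mem_cons, not_or] at hc
    rw [List.foldl_cons, ih _ _ hc.2, PySem.Dict.getD_insert, if_neg hc.1]

theorem getD_foldl_sort_mem (f : String × List String → List String)
    (l : List (String × List String)) : ∀ (d : PySem.Dict String (List String)) (k : String) (v : List String),
    (l.map (fun p => p.1)).Nodup → (k, v) ∈ l →
    (l.foldl (fun sl p => sl.insert p.1 (f p)) d).getD k [] = f (k, v) := by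
  induction l with
  | nil => intro d k v _ h; cases h
  | cons p l ih =>
    intro d k v hnd hmem
    rw [List.map_cons, List.nodup_cons] at hnd
    rw [List.foldl_cons]
    rcases List.mem_cons.mp hmem with heq | hmem'
    · have hk : k ∉ l.map (fun p => p.1) := by
        rw [← heq] at hnd; exact hnd.1
      rw [getD_foldl_sort_not_mem f l _ _ hk, PySem.Dict.getD_insert, ← heq]
      simp
    · exact ih _ _ _ hnd.2 hmem'

theorem set_update_self (xs : List String) : ∀ (s : PySem.Set String),
    (∀ x ∈ xs, x ∈ s) → PySem.Set.update s xs = s := by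
  induction xs with
  | nil => intro s _; rfl
  | cons x xs ih =>
    intro s h
    show PySem.Set.update (PySem.Set.add s x) xs = s
    have hx : x ∈ s := h x (List.mem_cons_self ..)
    have hadd : PySem.Set.add s x = s := by simp [PySem.Set.add, hx]
    rw [hadd]
    exact ih s (fun y hy => h y (List.mem_cons_of_mem _ hy))

theorem sort_pass_items (d : PySem.Dict String (List String)) (hnd : d.keys.Nodup) :
    (d.items.foldl
      (fun sl p => sl.insert p.1 (PySem.List.sorted p.2 (fun x => x) false)) d).items
    = d.keys.map (fun k => (k, PySem.List.sorted (d.getD k []) (fun x => x) false)) := by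
  have hkeys : (d.items.foldl
      (fun sl p => sl.insert p.1 (PySem.List.sorted p.2 (fun x => x) false)) d).keys = d.keys := by
    rw [PySem.Dict.keys_foldl_insert_key d.items (fun p => p.1)
      (fun sl p => PySem.List.sorted p.2 (fun x => x) false) d]
    have : d.items.map (fun p => p.1) = d.keys := rfl
    rw [this]
    exact set_update_self d.keys d.keys (fun x hx => hx)
  have hnd2 : (d.items.foldl
      (fun sl p => sl.insert p.1 (PySem.List.sorted p.2 (fun x => x) false)) d).keys.Nodup := by
    rw [hkeys]; exact hnd
  rw [PySem.Dict.items_eq_map_keys _ hnd2 [], hkeys]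
  apply List.map_congr_left
  intro k hk
  have hcont : d.contains k = true := (PySem.Dict.contains_iff_mem_keys d k).mpr hk
  obtain ⟨v, hv⟩ : ∃ v, d.get? k = some v := by
    cases hget : d.get? k with
    | none => rw [(PySem.Dict.get?_eq_none_iff_contains d k).mp hget] at hcont; cases hcont
    | some v => exact ⟨v, rfl⟩
  have hmem : (k, v) ∈ d.items := PySem.Dict.mem_items_of_get?_eq_some d hv
  have hgetD : d.getD k [] = v := by
    rw [PySem.Dict.getD_eq_get?_getD, hv]; rfl
  have hndfst : (d.items.map (fun p => p.1)).Nodup := hnd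
  rw [getD_foldl_sort_mem _ d.items d k v hndfst hmem, hgetD]

-- ===== VERDICT (by name: the statement is the Claim_ definition above) =====
theorem hashtagi_spec : Claim_equal_hashtagi := by
  intro tviti _
  unfold Spec_hashtagi hashtagi hashtagi_alt
  simp only [nested_eq_flat]
  rw [sort_pass_items _ (nodup_keys_foldl_stepP _), keys_foldl_stepP]
  simp only [PySem.List.dedup_eq_ofList]
  apply List.map_congr_left
  intro k _
  rw [getD_foldl_stepP]
  simp [PySem.Dict.getD_empty]
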